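-- pv_equiv track=rewrite | github.com/daniel-reich/ubiquitous-fiesta | ucsJxQNrkYnpzPaFj_23.py | char_appears
-- ===== SOURCE A (Python) =====
-- def char_appears(sentence, char):
--     finallist=[]
--     for words in str.lower(sentence).split():
--         count=0
--         for letter in words:
--             if letter == str.lower(char):
--                 count+=1
--         finallist.append(count)
--     return finallist
-- ===== SOURCE B (Python) =====
-- def char_appears(sentence, char):
--     # Single streaming pass: a small state machine over the lowered sentence that
--     # tokenizes and counts at once -- no split(), no per-word inner loop.
--     target = char.lower()
--     result = []
--     count = None  # None = currently between words
--     for c in sentence.lower():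
--         if c.isspace():
--             if count is not None:
--                 result.append(count)
--                 count = None
--         else:
--             if count is None:
--                 count = 0
--             if c == target:
--                 count += 1
--     if count is not None:
--         result.append(count)
--     return result
-- ===== Notes on version B (the rewrite author's own statement) =====
-- stated objective: faster
-- what changed: B replaces A's split()-then-nested-scan (which recomputes char.lower() for every letter) by a single streaming state machine over the lowered sentence that lowers char once and tokenizes and counts in one pass with an Option accumulator, never materialising the word list.
import Mathlib
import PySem

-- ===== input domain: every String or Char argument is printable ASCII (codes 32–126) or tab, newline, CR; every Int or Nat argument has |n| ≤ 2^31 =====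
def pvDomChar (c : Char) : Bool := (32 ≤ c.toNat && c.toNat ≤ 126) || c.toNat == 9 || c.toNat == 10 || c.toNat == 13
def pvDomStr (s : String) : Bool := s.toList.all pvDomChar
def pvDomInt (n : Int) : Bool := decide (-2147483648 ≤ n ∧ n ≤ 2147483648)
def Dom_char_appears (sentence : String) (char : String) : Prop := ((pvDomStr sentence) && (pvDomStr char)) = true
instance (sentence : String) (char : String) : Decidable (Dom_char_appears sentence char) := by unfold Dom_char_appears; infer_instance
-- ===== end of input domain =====

-- B replaces A's split()-then-nested-scan by a single streaming state machine over the lowered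
-- sentence that tokenizes and counts in one pass (objective: alternative).

-- ===== PORT A =====
-- A: for each word of lower(sentence).split(), scan its letters and count those equal
-- (as 1-character strings) to lower(char), appending the count.
def char_appears (sentence : String) (char : String) : List Int :=
  (PySem.Str.split₀ (PySem.Str.lower sentence)).foldl
    (fun finallist words =>
      finallist ++
        [words.toList.foldl
          (fun count letter =>
            if [letter] = (PySem.Str.lower char).toList then count + 1 else count)
          (0 : Int)])
    []

-- ===== PORT B =====
-- B's loop body: state = (result so far, optional count of the word in progress;
-- none = between words); final flush of the open word after the loop.
def charAppearsGo (t : List Char) : List Char → Option Int → List Int → List Int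
  | [], count, result =>
      match count with
      | none => result
      | some k => result ++ [k]
  | c :: rest, count, result =>
      if PySem.Chars.isspace c then
        match count with
        | none => charAppearsGo t rest none result
        | some k => charAppearsGo t rest none (result ++ [k])
      else
        charAppearsGo t rest (some (count.getD 0 + if [c] = t then 1 else 0)) result

-- B: target = lower(char) once, then one pass over lower(sentence) with the state machine.
def char_appears_alt (sentence : String) (char : String) : List Int :=
  let target := (PySem.Str.lower char).toList
  charAppearsGo target (PySem.Str.lower sentence).toList none []

-- ===== PRECONDITION & SPEC =====
def Spec_char_appears (sentence : String) (char : String) (out : List Int) : Prop := out = char_appears_alt sentence char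
instance (sentence : String) (char : String) (out : List Int) : Decidable (Spec_char_appears sentence char out) := by unfold Spec_char_appears; infer_instance

-- ===== CLAIM =====
def Claim_equal_char_appears : Prop := ∀ (sentence : String) (char : String), Dom_char_appears sentence char → Spec_char_appears sentence char (char_appears sentence char)

-- ===== LEMMAS AND PROOFS =====

-- the per-word count A computes, as countP
def cntT (t : List Char) (w : List Char) : Int :=
  ((w.countP (fun c => decide ([c] = t))) : Int)

theorem foldl_cnt (t : List Char) (w : List Char) :
    w.foldl (fun count letter => if [letter] = t then count + 1 else count) (0 : Int)
      = cntT t w := by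
  rw [PySem.List.foldl_ite_add_one]
  simp [cntT]

theorem cntT_rev_cons (t : List Char) (c : Char) (cs : List Char) :
    cntT t (cs.reverse ++ [c]) = cntT t (c :: cs) := by
  simp [cntT, List.countP_append, List.countP_reverse, List.countP_cons, Nat.add_comm]

theorem cntT_cons (t : List Char) (c : Char) (w : List Char) :
    cntT t (c :: w) = cntT t w + (if [c] = t then 1 else 0) := by
  by_cases h : [c] = t <;> simp [cntT, h]

-- invariant linking B's state machine to A's split₀.go tokenizer
theorem go_eq (t : List Char) (s : List Char) :
    ∀ (cur : List Char) (acc : List (List Char)),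
      charAppearsGo t s (if cur = [] then none else some (cntT t cur))
          (acc.reverse.map (cntT t))
        = (PySem.Chars.split₀.go s cur acc).map (cntT t) := by
  induction s with
  | nil =>
      intro cur acc
      cases cur with
      | nil => simp [charAppearsGo, PySem.Chars.split₀.go]
      | cons c cs =>
          simp [charAppearsGo, PySem.Chars.split₀.go, cntT_rev_cons]
  | cons c rest ih =>
      intro cur acc
      by_cases hs : PySem.Chars.isspace c = true
      · cases cur with
        | nil =>
            simpa [charAppearsGo, PySem.Chars.split₀.go, hs] using ih [] acc
        | cons d ds =>
            have := ih [] ((d :: ds).reverse :: acc)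
            simp only [if_true, List.map_append, List.map_cons, List.map_nil,
              List.reverse_cons, cntT_rev_cons] at this
            simpa [charAppearsGo, PySem.Chars.split₀.go, hs, List.reverse_cons] using this
      · have := ih (c :: cur) acc
        simp only [if_neg (List.cons_ne_nil c cur)] at this
        have hgd : (if cur = [] then (none : Option Int) else some (cntT t cur)).getD 0
            = cntT t cur := by
          cases cur with
          | nil => simp [cntT]
          | cons d ds => simp
        simp only [charAppearsGo, PySem.Chars.split₀.go, hs, Bool.false_eq_true,
          ite_false] at *
        rw [← this, hgd, cntT_cons]

theorem stream_eq_split (t : List Char) (s : List Char) :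
    charAppearsGo t s none []
      = (PySem.Chars.split₀ s).map (cntT t) := by
  have := go_eq t s [] []
  simpa [PySem.Chars.split₀] using this

-- ===== VERDICT =====
theorem char_appears_spec : Claim_equal_char_appears := by
  intro sentence char _
  unfold Spec_char_appears char_appears char_appears_alt
  rw [PySem.List.foldl_append_singleton_eq_map]
  rw [stream_eq_split]
  simp only [List.nil_append, PySem.Str.split₀, List.map_map]
  refine List.map_congr_left (fun w _ => ?_)
  simp [Function.comp, foldl_cnt]
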